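-- pv_equiv track=rewrite | github.com/pypi-data/pypi-mirror-391 | packages/ptech-morelia/ptech_morelia-1.8.0-py3-none-any.whl/Morelia/Devices/PodDevice_8229.py | _code_decimal_as_hex
-- ===== SOURCE A (Python) =====
-- def _code_decimal_as_hex(val: int) -> int :
--     """Builds an integer that equals the val argument when converted into hexadecimal. \
--     All integers are converted to hexadecimal ASCII encoded bytes. Some commands \
--     (i.e. 8229 #140) need decimal ASCII encoded bytes; to do this, give the return \
--     value of _code_decimal_as_hex() as the payload. Example: I want a number that is \
--     equal to 16 in hex. 1*16^1 + 6*16^0 = 22. Calling _code_decimal_as_hex(16) will \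
--     return 22.
--
--     Args:
--         val (int): Unsigned integer number.
--
--     Returns:
--         int: integer that equals the val argument when converted into hexadecimal.
--     """
--     dec_as_hex: int = 0
--     # get each digit and reverse order
--     decimal: list[int] = [ int(x) for x in [*str(val)] ]
--     decimal.reverse()
--     # calculate hex: dn-1 … d1 d0 (hex) = dn-1 * 16^n-1 + … + d1 * 16^1 + d0 * 16^0 (decimal)
--     for i,digit in enumerate(decimal) :
--         dec_as_hex_digit = digit * 16**i
--         dec_as_hex += dec_as_hex_digit
--     return(dec_as_hex)
-- ===== SOURCE B (Python) =====
-- def _code_decimal_as_hex(val: int) -> int: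
--     # Horner's method over the decimal digits, left to right: no digit list,
--     # no reversal, no explicit powers of 16.
--     result = 0
--     for ch in str(val):
--         result = result * 16 + int(ch)
--     return result
-- ===== Notes on version B (the rewrite author's own statement) =====
-- stated objective: simpler
-- what changed: Replaces building a digit list, reversing it and summing digit*16**i over enumerate with a single left-to-right Horner loop result = result*16 + int(ch) over str(val).
import Mathlib
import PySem

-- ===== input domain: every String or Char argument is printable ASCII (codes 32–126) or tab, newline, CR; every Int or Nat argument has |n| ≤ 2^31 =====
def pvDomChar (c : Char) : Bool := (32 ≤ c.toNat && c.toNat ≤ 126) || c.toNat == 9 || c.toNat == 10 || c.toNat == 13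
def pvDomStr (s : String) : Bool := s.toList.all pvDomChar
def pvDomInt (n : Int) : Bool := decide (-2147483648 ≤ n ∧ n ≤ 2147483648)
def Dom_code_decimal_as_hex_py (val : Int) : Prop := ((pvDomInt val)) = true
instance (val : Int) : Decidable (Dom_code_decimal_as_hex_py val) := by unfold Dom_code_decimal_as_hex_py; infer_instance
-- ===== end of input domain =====

-- B reads the decimal digits left-to-right with Horner's rule (result = result*16 + digit)
-- instead of A's digit list + reverse + enumerate sum of digit * 16**i; return values agree
-- on all val ≥ 0 (both raise ValueError on negative val, excluded by Pre_).

-- ===== PORT A =====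
-- int(x) for a single char is ported as c.toNat - 48, exact for the digit chars '0'-'9'
-- that str(val) yields under Pre_ (val ≥ 0); 16**i uses the enumerate index i ≥ 0, so
-- i.toNat is exact.
def code_decimal_as_hex_py (val : Int) : Int :=
  let decimal : List Int :=
    (((PySem.Int.toStr val).toList.map (fun c => ((c.toNat : Int) - 48)))).reverse
  (PySem.List.enumerate decimal 0).foldl
    (fun acc (p : Int × Int) => acc + p.2 * 16 ^ p.1.toNat) 0

-- ===== PORT B =====
def code_decimal_as_hex_py_alt (val : Int) : Int :=
  (PySem.Int.toStr val).toList.foldl (fun acc c => acc * 16 + ((c.toNat : Int) - 48)) 0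

-- ===== PRECONDITION & SPEC =====
-- A raises ValueError on negative val (int('-') in the digit comprehension); B's loop raises there too.
def Pre_code_decimal_as_hex_py (val : Int) : Prop := 0 ≤ val
instance (val : Int) : Decidable (Pre_code_decimal_as_hex_py val) := by unfold Pre_code_decimal_as_hex_py; infer_instance
def pvWitness_code_decimal_as_hex_py : Int := 16

def Spec_code_decimal_as_hex_py (val : Int) (out : Int) : Prop := out = code_decimal_as_hex_py_alt val
instance (val : Int) (out : Int) : Decidable (Spec_code_decimal_as_hex_py val out) := by unfold Spec_code_decimal_as_hex_py; infer_instance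

-- ===== CLAIM (what is proved, stated in full; the proofs are below) =====
def Claim_equal_code_decimal_as_hex_py : Prop := ∀ (val : Int), Dom_code_decimal_as_hex_py val → Pre_code_decimal_as_hex_py val → Spec_code_decimal_as_hex_py val (code_decimal_as_hex_py val)

-- ===== LEMMAS AND PROOFS =====

-- little-endian value of a digit list (head = least significant digit)
def pvLE (l : List Int) : Int :=
  match l with
  | [] => 0
  | d :: t => d + 16 * pvLE t

-- B's fold with a generalized accumulator
theorem pvHorner (l : List Int) (a : Int) :
    l.foldl (fun acc d => acc * 16 + d) a
      = a * 16 ^ l.length + l.foldl (fun acc d => acc * 16 + d) 0 := by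
  induction l generalizing a with
  | nil => simp
  | cons d t ih =>
    simp only [List.foldl_cons, List.length_cons]
    rw [ih (a * 16 + d), ih (0 * 16 + d)]
    ring

-- A's enumerate fold equals the little-endian value
theorem pvEnumFold (r : List Int) (s : Nat) (a : Int) :
    (PySem.List.enumerate r (s : Int)).foldl
        (fun acc (p : Int × Int) => acc + p.2 * 16 ^ p.1.toNat) a
      = a + 16 ^ s * pvLE r := by
  induction r generalizing s a with
  | nil => simp [PySem.List.enumerate_nil, pvLE]
  | cons d t ih =>
    rw [PySem.List.enumerate_cons, List.foldl_cons]
    have hcast : (s : Int) + 1 = ((s + 1 : Nat) : Int) := by push_cast; ring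
    rw [hcast, ih (s + 1) (a + d * 16 ^ (s : Int).toNat)]
    simp [pvLE, pow_succ]
    ring

theorem pvLE_append (xs : List Int) (d : Int) :
    pvLE (xs ++ [d]) = pvLE xs + 16 ^ xs.length * d := by
  induction xs with
  | nil => simp [pvLE]
  | cons x t ih => simp [pvLE, ih]; ring

-- the reversed little-endian value equals B's Horner fold
theorem pvLE_reverse (l : List Int) :
    pvLE l.reverse = l.foldl (fun acc d => acc * 16 + d) 0 := by
  induction l with
  | nil => rfl
  | cons d t ih =>
    rw [List.reverse_cons, pvLE_append, ih, List.foldl_cons]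
    rw [pvHorner t (0 * 16 + d)]
    simp [List.length_reverse]
    ring

-- ===== VERDICT (by name: the statement is the Claim_ definition above) =====
theorem code_decimal_as_hex_py_spec : Claim_equal_code_decimal_as_hex_py := by
  intro val _ _
  unfold Spec_code_decimal_as_hex_py code_decimal_as_hex_py code_decimal_as_hex_py_alt
  have h := pvEnumFold (((PySem.Int.toStr val).toList.map (fun c => ((c.toNat : Int) - 48)))).reverse 0 0
  simp only [Nat.cast_zero] at h
  rw [h, pvLE_reverse]
  simp [List.foldl_map]
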